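-- pv_equiv track=rewrite | github.com/SaraMWillis/slurm-wrappers | formatting/sorting.py | sort_node_types
-- ===== SOURCE A (Python) =====
-- def sort_node_types(node_specs,node_types):
--     max_cpus = 0
--     max_gpus = 0
--
--     sorted_specs = {}
--
--     for ntype in node_types.keys():
--         sorted_specs[ntype] = []
--
--     for key, data in node_specs.items():
--         if key in ("REASONS","MAX_CPUS"):
--             pass
--         else:
--             Node_Type = data["Node_Type"]
--             CPUAlloc = int(data["CPUAlloc"])
--             TotalCPU = int(data["CPUTot"])
--             if TotalCPU > max_cpus:
--                 max_cpus = TotalCPU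
--             if Node_Type in node_types.keys():
--                 sorted_specs[Node_Type].append((key,CPUAlloc))
--             try:
--                 TotalGPU = int(data["CfgTRES"])
--             except KeyError:
--                 TotalGPU = 0
--             if TotalGPU > max_gpus:
--                 max_gpus = TotalGPU
--
--     for i in sorted_specs.values():
--         i.sort(key=lambda x: x[1], reverse=True)
--     return sorted_specs, max_cpus, max_gpus
-- ===== SOURCE B (Python) =====
-- def sort_node_types(node_specs, node_types):
--     valid = [(k, d) for k, d in node_specs.items()
--              if k not in ("REASONS", "MAX_CPUS")]
--
--     max_cpus = max([0] + [int(d["CPUTot"]) for _, d in valid])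
--
--     def gpu_count(d):
--         try:
--             return int(d["CfgTRES"])
--         except KeyError:
--             return 0
--
--     max_gpus = max([0] + [gpu_count(d) for _, d in valid])
--
--     sorted_specs = {
--         t: sorted(((k, int(d["CPUAlloc"])) for k, d in valid
--                    if d["Node_Type"] == t),
--                   key=lambda x: x[1], reverse=True)
--         for t in node_types
--     }
--     return sorted_specs, max_cpus, max_gpus
-- ===== Notes on version B (the rewrite author's own statement) =====
-- stated objective: simpler
-- what changed: A's single fused loop threading a seeded mutable dict plus two running maxima is replaced by independent passes: a valid-entry list, two generator-style max([0]+...) computations, and a per-type dict comprehension that filters and sorts each bucket declaratively.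
import Mathlib
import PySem

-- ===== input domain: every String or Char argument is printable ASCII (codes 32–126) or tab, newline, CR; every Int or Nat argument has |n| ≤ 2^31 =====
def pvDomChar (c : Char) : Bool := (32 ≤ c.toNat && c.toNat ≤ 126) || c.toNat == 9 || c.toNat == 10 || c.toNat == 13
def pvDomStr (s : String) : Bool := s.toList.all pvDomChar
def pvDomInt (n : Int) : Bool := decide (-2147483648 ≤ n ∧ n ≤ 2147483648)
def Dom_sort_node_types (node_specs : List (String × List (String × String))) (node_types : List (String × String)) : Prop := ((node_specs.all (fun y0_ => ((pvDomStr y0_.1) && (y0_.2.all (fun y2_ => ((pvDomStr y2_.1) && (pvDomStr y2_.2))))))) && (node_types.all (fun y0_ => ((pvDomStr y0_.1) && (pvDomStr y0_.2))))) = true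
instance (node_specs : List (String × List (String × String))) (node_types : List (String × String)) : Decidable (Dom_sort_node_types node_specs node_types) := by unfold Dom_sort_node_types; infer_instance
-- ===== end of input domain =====

-- B recomputes the two maxima as independent max() passes over the valid entries and builds each
-- bucket declaratively per node type (filter + sort) instead of A's single fused loop with a seeded
-- mutable dict; objective: simpler.

-- ===== PORT A =====
-- A's per-node dict data is an association list; lookups go through PySem.Dict (first match).
-- the body of A's 'for key, data in node_specs.items()' loop (state: sorted_specs, max_cpus, max_gpus)
def pvStepA (node_types : List (String × String))
    (st : PySem.Dict String (List (String × Int)) × Int × Int)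
    (kv : String × List (String × String)) : PySem.Dict String (List (String × Int)) × Int × Int :=
  if kv.1 == "REASONS" || kv.1 == "MAX_CPUS" then st
  else
    match (PySem.Dict.mk kv.2).get? "Node_Type",
          ((PySem.Dict.mk kv.2).get? "CPUAlloc").bind PySem.Int.ofStr?,
          ((PySem.Dict.mk kv.2).get? "CPUTot").bind PySem.Int.ofStr? with
    | some nty, some cpuAlloc, some totalCPU =>
      -- all three lookups/parses succeed; Pre_ keeps exactly these inputs (else Python raises)
      let mc := if totalCPU > st.2.1 then totalCPU else st.2.1
      let ss := if (node_types.map Prod.fst).contains nty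
                then st.1.modify nty [] (fun l => l ++ [(kv.1, cpuAlloc)])
                else st.1
      let totalGPU : Int :=
        match (PySem.Dict.mk kv.2).get? "CfgTRES" with
        | some s => (PySem.Int.ofStr? s).getD 0   -- getD 0 only reachable outside Pre_ (Python: ValueError)
        | none => 0                               -- KeyError caught: TotalGPU = 0
      let mg := if totalGPU > st.2.2 then totalGPU else st.2.2
      (ss, mc, mg)
    | _, _, _ => st       -- KeyError/ValueError: Python raises; excluded by Pre_

def sort_node_types (node_specs : List (String × List (String × String))) (node_types : List (String × String)) : (List (String × List (String × Int))) × Int × Int :=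
  let seed : PySem.Dict String (List (String × Int)) :=
    node_types.foldl (fun d p => d.insert p.1 ([] : List (String × Int))) PySem.Dict.empty
  let st := node_specs.foldl (pvStepA node_types) (seed, (0 : Int), (0 : Int))
  (st.1.items.map (fun p => (p.1, PySem.List.sorted p.2 (fun x => x.2) true)), st.2.1, st.2.2)

-- ===== PORT B =====
-- Source B's gpu_count helper
def pvGpuCount (d : List (String × String)) : Int :=
  match (PySem.Dict.mk d).get? "CfgTRES" with
  | some s => (PySem.Int.ofStr? s).getD 0   -- getD 0 only reachable outside Pre_ (Python: ValueError)
  | none => 0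

def sort_node_types_alt (node_specs : List (String × List (String × String))) (node_types : List (String × String)) : (List (String × List (String × Int))) × Int × Int :=
  let valid := node_specs.filter (fun kv => !(kv.1 == "REASONS" || kv.1 == "MAX_CPUS"))
  -- max([0] + [...]): max? on a nonempty list; the getD 0 defaults are only reachable outside Pre_ (Python raises there)
  let max_cpus : Int :=
    ((PySem.List.max? ((0 : Int) :: valid.map (fun kv => (((PySem.Dict.mk kv.2).get? "CPUTot").bind PySem.Int.ofStr?).getD 0)) (fun y => y)).getD 0)
  let max_gpus : Int :=
    ((PySem.List.max? ((0 : Int) :: valid.map (fun kv => pvGpuCount kv.2)) (fun y => y)).getD 0)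
  let sorted_specs : PySem.Dict String (List (String × Int)) :=
    node_types.foldl
      (fun d p =>
        d.insert p.1
          (PySem.List.sorted
            ((valid.filter (fun kv => ((PySem.Dict.mk kv.2).get? "Node_Type").getD "" == p.1)).map
              (fun kv => (kv.1, (((PySem.Dict.mk kv.2).get? "CPUAlloc").bind PySem.Int.ofStr?).getD 0)))
            (fun x => x.2) true))
      PySem.Dict.empty
  (sorted_specs.items, max_cpus, max_gpus)

-- ===== PRECONDITION & SPEC =====
-- Pre_ keeps exactly the inputs where Python A returns: every entry not keyed "REASONS"/"MAX_CPUS"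
-- must carry a "Node_Type" key, int-parsable "CPUAlloc" and "CPUTot", and an int-parsable "CfgTRES"
-- when that key is present (otherwise A raises KeyError/ValueError).
def Pre_sort_node_types (node_specs : List (String × List (String × String))) (node_types : List (String × String)) : Prop :=
  node_specs.all (fun kv =>
    (kv.1 == "REASONS" || kv.1 == "MAX_CPUS") ||
    (((PySem.Dict.mk kv.2).get? "Node_Type").isSome &&
     (((PySem.Dict.mk kv.2).get? "CPUAlloc").bind PySem.Int.ofStr?).isSome &&
     (((PySem.Dict.mk kv.2).get? "CPUTot").bind PySem.Int.ofStr?).isSome &&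
     (((PySem.Dict.mk kv.2).get? "CfgTRES").map (fun s => (PySem.Int.ofStr? s).isSome)).getD true)) = true
instance (node_specs : List (String × List (String × String))) (node_types : List (String × String)) : Decidable (Pre_sort_node_types node_specs node_types) := by unfold Pre_sort_node_types; infer_instance

def pvWitness_sort_node_types : (List (String × List (String × String))) × (List (String × String)) :=
  ([("n1", [("Node_Type", "gpu"), ("CPUAlloc", "3"), ("CPUTot", "8"), ("CfgTRES", "2")]),
    ("REASONS", []),
    ("n2", [("Node_Type", "cpu"), ("CPUAlloc", "5"), ("CPUTot", "16")])],
   [("gpu", "x"), ("cpu", "y")])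

def Spec_sort_node_types (node_specs : List (String × List (String × String))) (node_types : List (String × String)) (out : (List (String × List (String × Int))) × Int × Int) : Prop := out = sort_node_types_alt node_specs node_types
instance (node_specs : List (String × List (String × String))) (node_types : List (String × String)) (out : (List (String × List (String × Int))) × Int × Int) : Decidable (Spec_sort_node_types node_specs node_types out) := by unfold Spec_sort_node_types; infer_instance

-- ===== CLAIM (what is proved, stated in full; the proofs are below) =====
def Claim_equal_sort_node_types : Prop := ∀ (node_specs : List (String × List (String × String))) (node_types : List (String × String)), Dom_sort_node_types node_specs node_types → Pre_sort_node_types node_specs node_types → Spec_sort_node_types node_specs node_types (sort_node_types node_specs node_types)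

-- ===== LEMMAS AND PROOFS =====

-- total projections of a node's data (agree with both ports' expressions on Pre_-accepted entries)
def pvValid (kv : String × List (String × String)) : Bool := !(kv.1 == "REASONS" || kv.1 == "MAX_CPUS")
def pvNty (d : List (String × String)) : String := ((PySem.Dict.mk d).get? "Node_Type").getD ""
def pvAlloc (d : List (String × String)) : Int := (((PySem.Dict.mk d).get? "CPUAlloc").bind PySem.Int.ofStr?).getD 0
def pvTot (d : List (String × String)) : Int := (((PySem.Dict.mk d).get? "CPUTot").bind PySem.Int.ofStr?).getD 0

-- A's loop body, on a Pre_-accepted entry, written componentwise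
theorem pvStep_eq (node_types : List (String × String)) (kv : String × List (String × String))
    (h : ((kv.1 == "REASONS" || kv.1 == "MAX_CPUS") ||
      (((PySem.Dict.mk kv.2).get? "Node_Type").isSome &&
       (((PySem.Dict.mk kv.2).get? "CPUAlloc").bind PySem.Int.ofStr?).isSome &&
       (((PySem.Dict.mk kv.2).get? "CPUTot").bind PySem.Int.ofStr?).isSome &&
       (((PySem.Dict.mk kv.2).get? "CfgTRES").map (fun s => (PySem.Int.ofStr? s).isSome)).getD true)) = true)
    (st : PySem.Dict String (List (String × Int)) × Int × Int) :
    pvStepA node_types st kv =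
    ((fun (d : PySem.Dict String (List (String × Int))) kv =>
        if pvValid kv && (node_types.map Prod.fst).contains (pvNty kv.2)
        then d.modify (pvNty kv.2) [] (fun l => l ++ [(kv.1, pvAlloc kv.2)]) else d) st.1 kv,
     (fun (m : Int × Int) kv =>
        ((if pvValid kv then max m.1 (pvTot kv.2) else m.1),
         (if pvValid kv then max m.2 (pvGpuCount kv.2) else m.2))) st.2 kv) := by
  unfold pvStepA
  by_cases hv0 : (kv.1 == "REASONS" || kv.1 == "MAX_CPUS") = true
  · simp [pvValid, hv0]
  · have hv : (kv.1 == "REASONS" || kv.1 == "MAX_CPUS") = false := by simpa using hv0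
    rw [hv] at h
    simp only [Bool.false_or, Bool.and_eq_true] at h
    obtain ⟨⟨⟨h1, h2⟩, h3⟩, _⟩ := h
    obtain ⟨nty, hn⟩ := Option.isSome_iff_exists.mp h1
    obtain ⟨ca, ha⟩ := Option.isSome_iff_exists.mp h2
    obtain ⟨ct, ht⟩ := Option.isSome_iff_exists.mp h3
    have hmax : ∀ a b : Int, (if b > a then b else a) = max a b := by
      intro a b; simp only [max_def]; split_ifs <;> omega
    rw [hv, hn, ha, ht]
    simp only [Bool.false_eq_true, if_false]
    simp only [pvValid, pvNty, pvAlloc, pvTot, pvGpuCount, hv, hn, ha, ht,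
      Option.getD_some, Bool.not_false, Bool.true_and, if_true, hmax]

-- seeding a dict with [] at each key leaves every getD · [] unchanged
theorem pvSeed_getD (node_types : List (String × String)) (d : PySem.Dict String (List (String × Int))) (k : String)
    (hd : ∀ j, d.getD j [] = []) :
    (node_types.foldl (fun d p => d.insert p.1 ([] : List (String × Int))) d).getD k [] = [] := by
  induction node_types generalizing d with
  | nil => exact hd k
  | cons p rest ih =>
    refine ih _ ?_ |>.trans rfl
    intro j
    rw [PySem.Dict.getD_insert]
    split_ifs <;> simp [hd]

-- a fold of inserts whose value depends only on the key, looked up afterwards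
theorem pvInsLoop_getD (node_types : List (String × String)) (v : String → List (String × Int))
    (d : PySem.Dict String (List (String × Int))) (k : String) :
    (node_types.foldl (fun d p => d.insert p.1 (v p.1)) d).getD k [] =
      if k ∈ node_types.map Prod.fst then v k else d.getD k [] := by
  induction node_types generalizing d with
  | nil => simp
  | cons p rest ih =>
    simp only [List.foldl_cons, ih, List.map_cons, List.mem_cons]
    by_cases hr : k ∈ rest.map Prod.fst
    · simp [hr]
    · rw [PySem.Dict.getD_insert]
      by_cases he : k = p.1 <;> simp [he, hr]

-- Set.update adds nothing when every element is already present
theorem pvSetUpdate_subset {s : PySem.Set String} {xs : List String}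
    (h : ∀ x ∈ xs, x ∈ s) : PySem.Set.update s xs = s := by
  induction xs generalizing s with
  | nil => rfl
  | cons x rest ih =>
    have hm : x ∈ s := h x (by simp)
    have hx : PySem.Set.add s x = s := by
      simp [PySem.Set.add, PySem.Set.contains, hm]
    show PySem.Set.update (PySem.Set.add s x) rest = s
    rw [hx]
    exact ih (fun y hy => h y (by simp [hy]))

-- ===== VERDICT (by name: the statement is the Claim_ definition above) =====
theorem sort_node_types_spec : Claim_equal_sort_node_types := by
  intro ns nt _ hpre
  unfold Pre_sort_node_types at hpre
  have hh := List.all_eq_true.mp hpre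
  unfold Spec_sort_node_types
  simp only [sort_node_types, sort_node_types_alt]
  rw [PySem.List.foldl_congr_mem ns (pvStepA nt) (fun (st : PySem.Dict String (List (String × Int)) × Int × Int) kv =>
        ((if pvValid kv && (nt.map Prod.fst).contains (pvNty kv.2)
          then st.1.modify (pvNty kv.2) [] (fun l => l ++ [(kv.1, pvAlloc kv.2)]) else st.1),
         (if pvValid kv then max st.2.1 (pvTot kv.2) else st.2.1),
         (if pvValid kv then max st.2.2 (pvGpuCount kv.2) else st.2.2)))
      _ (fun acc kv hm => pvStep_eq nt kv (hh kv hm) acc)]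
  rw [PySem.List.foldl_prod_mk
        (f := fun (d : PySem.Dict String (List (String × Int))) kv =>
          if pvValid kv && (nt.map Prod.fst).contains (pvNty kv.2)
          then d.modify (pvNty kv.2) [] (fun l => l ++ [(kv.1, pvAlloc kv.2)]) else d)
        (g := fun (m : Int × Int) kv =>
          ((if pvValid kv then max m.1 (pvTot kv.2) else m.1),
           (if pvValid kv then max m.2 (pvGpuCount kv.2) else m.2)))]
  rw [PySem.List.foldl_prod_mk
        (f := fun (a : Int) kv => if pvValid kv then max a (pvTot kv.2) else a)
        (g := fun (a : Int) kv => if pvValid kv then max a (pvGpuCount kv.2) else a)]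
  refine Prod.ext ?_ (Prod.ext ?_ ?_)
  · -- sorted_specs component
    dsimp only
    rw [PySem.List.foldl_if_eq_foldl_filter
          (p := fun kv => pvValid kv && (nt.map Prod.fst).contains (pvNty kv.2))
          (f := fun (d : PySem.Dict String (List (String × Int))) kv => d.modify (pvNty kv.2) [] (fun l => l ++ [(kv.1, pvAlloc kv.2)]))]
    rw [← List.foldl_map (f := fun (kv : String × List (String × String)) => (pvNty kv.2, (kv.1, pvAlloc kv.2)))
          (g := fun (d : PySem.Dict String (List (String × Int))) p => d.modify p.1 [] (fun l => l ++ [p.2]))]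
    have hseednodup : ((nt.foldl (fun d p => d.insert p.1 ([] : List (String × Int))) PySem.Dict.empty)).keys.Nodup := by
      exact PySem.Dict.nodup_keys_foldl_insert_key nt (fun p => p.1) (fun _ _ => []) _ (by simp)
    have hAnodup := PySem.Dict.nodup_keys_foldl_modify_key
      ((ns.filter (fun kv => pvValid kv && (nt.map Prod.fst).contains (pvNty kv.2))).map
        (fun kv => (pvNty kv.2, (kv.1, pvAlloc kv.2))))
      (fun p => p.1) [] (fun _ p => fun l => l ++ [p.2]) _ hseednodup
    have hBnodup : ((nt.foldl (fun d p =>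
        d.insert p.1 (PySem.List.sorted
          ((ns.filter (fun kv => !(kv.1 == "REASONS" || kv.1 == "MAX_CPUS")) |>.filter
              (fun kv => ((PySem.Dict.mk kv.2).get? "Node_Type").getD "" == p.1)).map
            (fun kv => (kv.1, (((PySem.Dict.mk kv.2).get? "CPUAlloc").bind PySem.Int.ofStr?).getD 0)))
          (fun x => x.2) true)) PySem.Dict.empty)).keys.Nodup := by
      exact PySem.Dict.nodup_keys_foldl_insert_key nt (fun p => p.1) _ _ (by simp)
    rw [PySem.Dict.items_eq_map_keys _ hAnodup [], PySem.Dict.items_eq_map_keys _ hBnodup []]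
    rw [PySem.Dict.keys_foldl_modify_key]
    rw [PySem.Dict.keys_foldl_insert_key]
    rw [PySem.Dict.keys_foldl_insert_key]
    simp only [PySem.Dict.keys_empty]
    rw [pvSetUpdate_subset (by
      intro x hx
      simp only [List.map_map, List.mem_map, List.mem_filter, Function.comp] at hx
      obtain ⟨kv, ⟨hkv, hcond⟩, rfl⟩ := hx
      rw [Bool.and_eq_true] at hcond
      exact (PySem.Set.mem_ofList _ _).mpr (List.contains_iff_mem.mp hcond.2))]
    rw [List.map_map]
    refine List.map_congr_left ?_
    intro k hk
    have hk' : k ∈ nt.map Prod.fst := (PySem.Set.mem_ofList _ _).mp hk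
    simp only [Function.comp]
    rw [PySem.Dict.getD_foldl_modify_append]
    rw [pvSeed_getD nt PySem.Dict.empty k (fun j => by simp)]
    rw [List.nil_append]
    rw [pvInsLoop_getD nt (fun t => PySem.List.sorted
          ((ns.filter (fun kv => !(kv.1 == "REASONS" || kv.1 == "MAX_CPUS")) |>.filter
              (fun kv => ((PySem.Dict.mk kv.2).get? "Node_Type").getD "" == t)).map
            (fun kv => (kv.1, (((PySem.Dict.mk kv.2).get? "CPUAlloc").bind PySem.Int.ofStr?).getD 0)))
          (fun x => x.2) true) PySem.Dict.empty k, if_pos hk']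
    rw [List.filter_map, List.map_map]
    congr 1
    unfold pvValid pvNty pvAlloc
    rw [List.filter_filter, List.filter_filter]
    simp only [Function.comp_def]
    refine congrArg (fun (l : List (String × Int)) => PySem.List.sorted l (fun x => x.2) true) ?_
    refine congrArg (List.map _) ?_
    refine List.filter_congr ?_
    intro kv _
    cases hn : (((PySem.Dict.mk kv.2).get? "Node_Type").getD "" == k) with
    | false => simp
    | true => simp [eq_of_beq hn, hk']
  · -- max_cpus component
    dsimp only
    rw [PySem.List.foldl_if_eq_foldl_filter (p := pvValid) (f := fun a kv => max a (pvTot kv.2)),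
        PySem.List.max?_id_cons, Option.getD_some, List.foldl_map]
    unfold pvValid pvTot
    rfl
  · -- max_gpus component
    dsimp only
    rw [PySem.List.foldl_if_eq_foldl_filter (p := pvValid) (f := fun a kv => max a (pvGpuCount kv.2)),
        PySem.List.max?_id_cons, Option.getD_some, List.foldl_map]
    unfold pvValid
    rfl
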